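-- pv_equiv track=rewrite | github.com/Sathya200411/youtube_short_generator | src/generators/image_overlay_generator.py | divide_content
-- ===== SOURCE A (Python) =====
-- def divide_content(reel_text):
--     """Divide the content into 2 parts, keeping headings and their associated lines together"""
--     # Group lines: a group is a heading and its following lines (until next heading or end)
--     groups = []
--     current_group = []
--     heading_keywords = [
--         'Tithi:', 'Nakshatra:', 'Auspicious Periods:', 'Avoid These Times:',
--         'Sunrise:', 'Sunset:', 'Lord:', 'Paksha', 'Muhurat', 'Kaal', 'Dur Muhurat', 'Varjyam', 'Rahu', 'Yamaganda', 'Gulika'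
--     ]
--     def is_heading(line):
--         # Consider a heading if it ends with ':' or matches a known keyword
--         return any(kw in line for kw in heading_keywords) or (line.strip().endswith(':'))
--     for line in reel_text:
--         if is_heading(line) and current_group:
--             groups.append(current_group)
--             current_group = [line]
--         else:
--             current_group.append(line)
--     if current_group:
--         groups.append(current_group)
--     # Now split groups as evenly as possible
--     total_lines = sum(len(g) for g in groups)
--     half_lines = total_lines // 2
--     part1, part2 = [], []
--     count = 0
--     for group in groups:
--         if count < half_lines:
--             part1.extend(group)
--             count += len(group)
--         else:
--             part2.extend(group)
--     return part1, part2
-- ===== SOURCE B (Python) =====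
-- def divide_content(reel_text):
--     """Divide the content into 2 parts, keeping headings and their associated lines together"""
--     heading_keywords = [
--         'Tithi:', 'Nakshatra:', 'Auspicious Periods:', 'Avoid These Times:',
--         'Sunrise:', 'Sunset:', 'Lord:', 'Paksha', 'Muhurat', 'Kaal', 'Dur Muhurat', 'Varjyam', 'Rahu', 'Yamaganda', 'Gulika'
--     ]
--
--     def is_heading(line):
--         return any(kw in line for kw in heading_keywords) or line.strip().endswith(':')
--
--     lines = list(reel_text)
--     n = len(lines)
--     half = n // 2
--     # group boundaries: index 0, plus every later index holding a heading line
--     boundaries = [i for i, line in enumerate(lines) if i == 0 or is_heading(line)]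
--     # split at the first group boundary whose prefix already holds >= half lines
--     s = next((b for b in boundaries if b >= half), n)
--     return lines[:s], lines[s:]
-- ===== Notes on version B (the rewrite author's own statement) =====
-- stated objective: simpler
-- what changed: B scans once to collect the group-start indices (0 plus heading positions), picks the first boundary >= len//2 as a single split index, and slices the input, instead of building nested group lists and conditionally extending two accumulator lists.
import Mathlib
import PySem

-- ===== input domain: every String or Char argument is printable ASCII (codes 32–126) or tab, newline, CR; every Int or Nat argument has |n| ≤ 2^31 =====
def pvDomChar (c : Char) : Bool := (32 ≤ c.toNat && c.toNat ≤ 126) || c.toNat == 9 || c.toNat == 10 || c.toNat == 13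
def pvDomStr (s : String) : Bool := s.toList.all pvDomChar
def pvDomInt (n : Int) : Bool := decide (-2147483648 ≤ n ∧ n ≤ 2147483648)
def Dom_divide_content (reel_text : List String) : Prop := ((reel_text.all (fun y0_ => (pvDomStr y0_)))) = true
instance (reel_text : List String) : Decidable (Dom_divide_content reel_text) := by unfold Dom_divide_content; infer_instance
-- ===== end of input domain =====

-- B computes a single split index from the heading/group boundaries and slices the input,
-- instead of building nested group lists and extending two accumulators (objective: simpler).

-- ===== PORT A =====
def pvKeywords : List String :=
  ["Tithi:", "Nakshatra:", "Auspicious Periods:", "Avoid These Times:",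
   "Sunrise:", "Sunset:", "Lord:", "Paksha", "Muhurat", "Kaal", "Dur Muhurat",
   "Varjyam", "Rahu", "Yamaganda", "Gulika"]

def pvIsHeading (line : String) : Bool :=
  pvKeywords.any (fun kw => PySem.Str.isIn kw line)
    || PySem.Str.endswith (PySem.Str.strip line) ":"

-- the grouping loop of A: state (groups, current_group)
def pvLoopA : List String → List (List String) → List String → List (List String) × List String
  | [], groups, cur => (groups, cur)
  | line :: rest, groups, cur =>
    if pvIsHeading line && !cur.isEmpty then pvLoopA rest (groups ++ [cur]) [line]
    else pvLoopA rest groups (cur ++ [line])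

-- the splitting loop of A: state (part1, part2, count)
def pvLoopA2 (half : Int) : List (List String) → List String → List String → Int → List String × List String
  | [], p1, p2, _ => (p1, p2)
  | g :: gs, p1, p2, c =>
    if c < half then pvLoopA2 half gs (p1 ++ g) p2 (c + (g.length : Int))
    else pvLoopA2 half gs p1 (p2 ++ g) c

def divide_content (reel_text : List String) : List String × List String :=
  let r := pvLoopA reel_text [] []
  let groups := if r.2.isEmpty then r.1 else r.1 ++ [r.2]
  let total : Int := (groups.map (fun g => (g.length : Int))).sum
  let half : Int := PySem.Int.floordiv total 2
  pvLoopA2 half groups [] [] 0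

-- ===== PORT B =====
def divide_content_alt (reel_text : List String) : List String × List String :=
  let lines := reel_text
  let n : Int := lines.length
  let half : Int := PySem.Int.floordiv n 2
  let boundaries : List Int :=
    (PySem.List.enumerate lines).filterMap
      (fun p => if p.1 == 0 || pvIsHeading p.2 then some p.1 else none)
  let s : Int := (boundaries.find? (fun b => decide (half ≤ b))).getD n
  (PySem.List.slice lines none (some s), PySem.List.slice lines (some s) none)

-- ===== PRECONDITION & SPEC =====
def Spec_divide_content (reel_text : List String) (out : List String × List String) : Prop := out = divide_content_alt reel_text
instance (reel_text : List String) (out : List String × List String) : Decidable (Spec_divide_content reel_text out) := by unfold Spec_divide_content; infer_instance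

-- ===== CLAIM (what is proved, stated in full; the proofs are below) =====
def Claim_equal_divide_content : Prop := ∀ (reel_text : List String), Dom_divide_content reel_text → Spec_divide_content reel_text (divide_content reel_text)

-- ===== LEMMAS AND PROOFS =====

-- chunk1 L = (lines of the current group coming from L, rest starting at the next heading)
def pvChunk1 : List String → List String × List String
  | [] => ([], [])
  | x :: xs => if pvIsHeading x then ([], x :: xs)
               else ((x :: (pvChunk1 xs).1), (pvChunk1 xs).2)

theorem pvChunk1_snd_length : ∀ L : List String, (pvChunk1 L).2.length ≤ L.length := by
  intro L
  induction L with
  | nil => simp [pvChunk1]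
  | cons x xs ih =>
    simp only [pvChunk1]
    split
    · simp
    · simpa using Nat.le_succ_of_le ih

theorem pvChunk1_append : ∀ L : List String, (pvChunk1 L).1 ++ (pvChunk1 L).2 = L := by
  intro L
  induction L with
  | nil => simp [pvChunk1]
  | cons x xs ih =>
    simp only [pvChunk1]
    split
    · simp
    · simpa using ih

-- the groups A builds, as a recursion on the input
def pvChunks : List String → List (List String)
  | [] => []
  | x :: xs => (x :: (pvChunk1 xs).1) :: pvChunks (pvChunk1 xs).2
termination_by L => L.length
decreasing_by exact Nat.lt_succ_of_le (pvChunk1_snd_length xs)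

theorem pvLoopA_fin : ∀ (L : List String) (groups : List (List String)) (cur : List String), cur ≠ [] →
    (if (pvLoopA L groups cur).2.isEmpty then (pvLoopA L groups cur).1
     else (pvLoopA L groups cur).1 ++ [(pvLoopA L groups cur).2])
    = groups ++ (cur ++ (pvChunk1 L).1) :: pvChunks (pvChunk1 L).2 := by
  intro L
  induction L with
  | nil =>
    intro groups cur hcur
    simp [pvLoopA, pvChunk1, pvChunks, List.isEmpty_iff, hcur]
  | cons x xs ih =>
    intro groups cur hcur
    by_cases hx : pvIsHeading x = true
    · have : pvLoopA (x :: xs) groups cur = pvLoopA xs (groups ++ [cur]) [x] := by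
        simp [pvLoopA, hx, hcur]
      rw [this, ih (groups ++ [cur]) [x] (by simp)]
      simp [pvChunk1, hx, pvChunks]
    · have : pvLoopA (x :: xs) groups cur = pvLoopA xs groups (cur ++ [x]) := by
        simp [pvLoopA, hx]
      rw [this, ih groups (cur ++ [x]) (by simp)]
      simp [pvChunk1, hx]
  
theorem pvChunks_flatten : ∀ L : List String, (pvChunks L).flatten = L := by
  intro L
  induction L using pvChunks.induct with
  | case1 => simp [pvChunks]
  | case2 x xs ih =>
    simp only [pvChunks, List.flatten_cons, ih]
    simpa using pvChunk1_append xs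

-- heading positions of L starting at offset c
def pvHB : List String → Int → List Int
  | [], _ => []
  | x :: xs, c => if pvIsHeading x then c :: pvHB xs (c + 1) else pvHB xs (c + 1)

-- group-start positions of a group list starting at offset c
def pvStarts : List (List String) → Int → List Int
  | [], _ => []
  | g :: gs, c => c :: pvStarts gs (c + (g.length : Int))

-- the cumulative count at which A's second loop stops adding to part1
def pvS (half : Int) : List (List String) → Int → Int
  | [], c => c
  | g :: gs, c => if c < half then pvS half gs (c + (g.length : Int)) else c

theorem pvHB_append : ∀ (u v : List String) (c : Int),
    pvHB (u ++ v) c = pvHB u c ++ pvHB v (c + (u.length : Int)) := by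
  intro u
  induction u with
  | nil => simp [pvHB]
  | cons x xs ih =>
    intro v c
    simp only [List.cons_append, pvHB]
    rw [ih]
    have : c + 1 + (xs.length : Int) = c + ((xs.length : Int) + 1) := by ring
    split <;> simp [this]
    
theorem pvHB_chunk1_fst : ∀ (L : List String) (c : Int), pvHB (pvChunk1 L).1 c = [] := by
  intro L
  induction L with
  | nil => intro c; simp [pvChunk1, pvHB]
  | cons x xs ih =>
    intro c
    simp only [pvChunk1]
    by_cases hx : pvIsHeading x = true
    · simp [hx, pvHB]
    · simp [hx, pvHB, ih]

theorem pvChunk1_snd_head : ∀ L : List String,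
    (pvChunk1 L).2 = [] ∨ ∃ y ys, (pvChunk1 L).2 = y :: ys ∧ pvIsHeading y = true := by
  intro L
  induction L with
  | nil => left; simp [pvChunk1]
  | cons x xs ih =>
    by_cases hx : pvIsHeading x = true
    · right; exact ⟨x, xs, by simp [pvChunk1, hx], hx⟩
    · simpa [pvChunk1, hx] using ih

theorem pvHB_eq_starts : ∀ L : List String,
    (L = [] ∨ ∃ y ys, L = y :: ys ∧ pvIsHeading y = true) →
    ∀ c : Int, pvHB L c = pvStarts (pvChunks L) c := by
  intro L
  induction L using pvChunks.induct with
  | case1 => intro _ c; simp [pvHB, pvChunks, pvStarts]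
  | case2 x xs ih =>
    intro h c
    have hx : pvIsHeading x = true := by
      rcases h with h | ⟨y, ys, heq, hy⟩
      · exact absurd h (by simp)
      · cases heq; exact hy
    simp only [pvHB, hx, if_true, pvChunks, pvStarts]
    congr 1
    conv_lhs => rw [← pvChunk1_append xs]
    rw [pvHB_append, pvHB_chunk1_fst, List.nil_append,
        ih (pvChunk1_snd_head xs) ((c + 1) + ((pvChunk1 xs).1.length : Int))]
    congr 1
    push_cast [List.length_cons]
    ring

theorem pvFilterMap_enumerate : ∀ (xs : List String) (c : Int), 1 ≤ c →
    (PySem.List.enumerate xs c).filterMap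
      (fun p => if p.1 == 0 || pvIsHeading p.2 then some p.1 else none)
    = pvHB xs c := by
  intro xs
  induction xs with
  | nil => intro c _; simp [PySem.List.enumerate_nil, pvHB]
  | cons x xs ih =>
    intro c hc
    rw [PySem.List.enumerate_cons]
    have hc0 : (c == 0) = false := by simp; omega
    simp only [List.filterMap_cons, hc0, Bool.false_or, pvHB]
    by_cases hx : pvIsHeading x = true
    · simp only [hx, if_true]
      rw [ih (c + 1) (by omega)]
    · simp only [hx, Bool.false_eq_true, if_false]
      rw [ih (c + 1) (by omega)]

theorem pvS_ge (half : Int) : ∀ (gs : List (List String)) (c : Int), c ≤ pvS half gs c := by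
  intro gs
  induction gs with
  | nil => intro c; simp [pvS]
  | cons g gs ih =>
    intro c
    simp only [pvS]
    split
    · calc c ≤ c + (g.length : Int) := by omega
        _ ≤ _ := ih _
    · omega

theorem pvS_stop (half : Int) (gs : List (List String)) (c : Int) (h : ¬ c < half) :
    pvS half gs c = c := by
  cases gs <;> simp [pvS, h]

theorem pvFind_starts (half : Int) : ∀ (gs : List (List String)) (c : Int),
    ((pvStarts gs c).find? (fun b => decide (half ≤ b))).getD (c + (gs.flatten.length : Int))
    = pvS half gs c := by
  intro gs
  induction gs with
  | nil => intro c; simp [pvStarts, pvS]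
  | cons g gs ih =>
    intro c
    simp only [pvStarts, pvS, List.find?_cons]
    by_cases h : half ≤ c
    · simp [h, not_lt.mpr h]
    · have hdec : (decide (half ≤ c)) = false := by simpa using h
      simp only [not_le] at h
      simp only [hdec, if_pos h]
      have hdef : c + (((g :: gs).flatten).length : Int)
          = (c + (g.length : Int)) + ((gs.flatten).length : Int) := by
        push_cast [List.flatten_cons, List.length_append]
        ring
      rw [hdef, ih]

theorem pvLoopA2_eq (half : Int) : ∀ (gs : List (List String)) (p1 p2 : List String) (c : Int),
    pvLoopA2 half gs p1 p2 c
    = (p1 ++ gs.flatten.take (pvS half gs c - c).toNat,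
       p2 ++ gs.flatten.drop (pvS half gs c - c).toNat) := by
  intro gs
  induction gs with
  | nil => intro p1 p2 c; simp [pvLoopA2, pvS]
  | cons g gs ih =>
    intro p1 p2 c
    simp only [pvLoopA2, pvS, List.flatten_cons]
    by_cases h : c < half
    · rw [if_pos h, if_pos h, ih]
      have hge : c + (g.length : Int) ≤ pvS half gs (c + (g.length : Int)) := pvS_ge half gs _
      have h1 : (pvS half gs (c + (g.length : Int)) - c).toNat
          = g.length + (pvS half gs (c + (g.length : Int)) - (c + (g.length : Int))).toNat := by
        omega
      rw [h1, List.take_length_add_append, List.drop_length_add_append]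
      simp
    · rw [if_neg h, if_neg h, ih, pvS_stop half gs c h]
      simp

theorem pvSum_lengths (gs : List (List String)) :
    (gs.map (fun g => (g.length : Int))).sum = (gs.flatten.length : Int) := by
  induction gs with
  | nil => simp
  | cons g gs ih => simp [ih]

theorem pvMain (x : String) (xs : List String) :
    divide_content (x :: xs) = divide_content_alt (x :: xs) := by
  have hgroups :
      (if (pvLoopA (x :: xs) [] []).2.isEmpty then (pvLoopA (x :: xs) [] []).1
       else (pvLoopA (x :: xs) [] []).1 ++ [(pvLoopA (x :: xs) [] []).2]) = pvChunks (x :: xs) := by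
    have hstep : pvLoopA (x :: xs) [] [] = pvLoopA xs [] [x] := by
      simp [pvLoopA]
    rw [hstep, pvLoopA_fin xs [] [x] (by simp)]
    simp [pvChunks]
  have hflat : (pvChunks (x :: xs)).flatten = x :: xs := pvChunks_flatten (x :: xs)
  have htotal : ((pvChunks (x :: xs)).map (fun g => (g.length : Int))).sum
      = ((x :: xs).length : Int) := by
    rw [pvSum_lengths, hflat]
  have hs0 : 0 ≤ pvS (PySem.Int.floordiv ((x :: xs).length : Int) 2) (pvChunks (x :: xs)) 0 :=
    pvS_ge _ (pvChunks (x :: xs)) 0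
  -- B's boundary list is the list of group starts
  have hbound :
      (PySem.List.enumerate (x :: xs)).filterMap
        (fun p => if p.1 == 0 || pvIsHeading p.2 then some p.1 else none)
      = pvStarts (pvChunks (x :: xs)) 0 := by
    rw [PySem.List.enumerate_cons, List.filterMap_cons, pvFilterMap_enumerate xs (0 + 1) (by norm_num)]
    norm_num
    simp only [pvChunks, pvStarts]
    congr 1
    conv_lhs => rw [← pvChunk1_append xs]
    rw [pvHB_append, pvHB_chunk1_fst, List.nil_append,
        pvHB_eq_starts (pvChunk1 xs).2 (pvChunk1_snd_head xs)]
    congr 1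
    push_cast [List.length_cons]
    ring
  have hfind :
      (((pvStarts (pvChunks (x :: xs)) 0).find?
          (fun b => decide (PySem.Int.floordiv ((x :: xs).length : Int) 2 ≤ b))).getD
        ((x :: xs).length : Int)
      = pvS (PySem.Int.floordiv ((x :: xs).length : Int) 2) (pvChunks (x :: xs)) 0) := by
    have := pvFind_starts (PySem.Int.floordiv ((x :: xs).length : Int) 2) (pvChunks (x :: xs)) 0
    rw [hflat] at this
    simpa using this
  simp only [divide_content, divide_content_alt]
  rw [hgroups, htotal, pvLoopA2_eq, hflat, hbound, hfind, sub_zero,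
      PySem.List.slice_to _ hs0, PySem.List.slice_from _ hs0]
  simp

-- ===== VERDICT (by name: the statement is the Claim_ definition above) =====
theorem divide_content_spec : Claim_equal_divide_content := by
  intro reel_text _
  show divide_content reel_text = divide_content_alt reel_text
  cases reel_text with
  | nil => decide
  | cons x xs => exact pvMain x xs
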